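-- pv_equiv track=rewrite | github.com/MDBrodskiy/Computing_Fundamentals | Homework/Homework 3/HW3Prob7Brodskiy.py | findMode
-- ===== SOURCE A (Python) =====
-- def findMode(mat):
--
--     freq_list = {}
--     mostFreq = 0
--
--     for i in mat:
--         for j in i:
--             if j not in freq_list:
--                 freq_list[j] = 1
--             else:
--                 freq_list[j] += 1
--
--     for i in freq_list:
--         if freq_list[i] > mostFreq:
--             mostFreq = freq_list[i]
--
--     for i in freq_list.keys():
--         if freq_list[i] == mostFreq:
--             return i
-- ===== SOURCE B (Python) =====
-- def findMode(mat):
--     flat = [x for row in mat for x in row]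
--     if not flat:
--         return None
--     pairs = sorted((v, i) for i, v in enumerate(flat))
--     # runs of equal values are contiguous; within a run indices ascend, so the
--     # first pair of a run carries the value's first-occurrence index (A's
--     # insertion order).  Keep the best run by (count desc, first index asc).
--     best_v, best_first, best_cnt = pairs[0][0], pairs[0][1], 1
--     cur_v, cur_first, cur_cnt = pairs[0][0], pairs[0][1], 1
--     for v, i in pairs[1:]:
--         if v == cur_v:
--             cur_cnt += 1
--         else:
--             cur_v, cur_first, cur_cnt = v, i, 1
--         if cur_cnt > best_cnt or (cur_cnt == best_cnt and cur_first < best_first):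
--             best_v, best_first, best_cnt = cur_v, cur_first, cur_cnt
--     return best_v
-- ===== Notes on version B (the rewrite author's own statement) =====
-- stated objective: alternative
-- what changed: Replaced A's hash-table counting (dict build, then a max-count scan, then a first-key-with-max-count scan) by a sort-based algorithm: sort the (value, index) pairs of the flattened matrix so equal values form contiguous runs with ascending indices, then one run-length scan keeps the run that is maximal by (count, then smallest first-occurrence index), which reproduces A's first-inserted-key tie-break without any dictionary.
-- outside the precondition, e.g. on findMode([[]]): A returns None, B returns None
import Mathlib
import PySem

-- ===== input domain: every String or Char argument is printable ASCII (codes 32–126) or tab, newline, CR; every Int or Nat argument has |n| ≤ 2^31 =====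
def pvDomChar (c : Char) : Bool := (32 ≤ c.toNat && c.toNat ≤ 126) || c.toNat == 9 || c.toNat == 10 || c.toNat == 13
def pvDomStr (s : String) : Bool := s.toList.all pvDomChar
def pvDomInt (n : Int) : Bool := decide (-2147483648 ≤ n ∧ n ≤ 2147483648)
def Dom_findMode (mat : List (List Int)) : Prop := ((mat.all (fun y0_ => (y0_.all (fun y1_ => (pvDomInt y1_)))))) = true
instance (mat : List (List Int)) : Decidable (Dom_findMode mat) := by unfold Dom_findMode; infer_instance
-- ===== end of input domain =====

-- B replaces A's dict counting by sort-then-run-scan (sort (value,index) pairs, keep the best run): a different algorithm of similar cost.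


-- ===== PORT A =====
def findMode (mat : List (List Int)) : Int :=
  let freq := mat.foldl (fun d i => i.foldl (fun d j =>
      if d.contains j = false then d.insert j 1 else d.modify j 0 (· + 1)) d)
      (PySem.Dict.empty : PySem.Dict Int Int)
  let mostFreq := freq.keys.foldl (fun m i => if freq.getD i 0 > m then freq.getD i 0 else m) 0
  -- freq_list[i] is exact as getD here: every scanned i is a key of the dict;
  -- the loop returns the first matching key; the fall-through (None, all-empty matrix) is the
  -- none case, defaulted to 0 and excluded by Pre_findMode
  (freq.keys.find? (fun i => freq.getD i 0 == mostFreq)).getD 0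

-- ===== PORT B =====
-- the loop body of Source B: state = (best (v, first, cnt), cur (v, first, cnt)), next pair q = (v, i)
def pvStep (st : (Int × Int × Int) × (Int × Int × Int)) (q : Int × Int) : (Int × Int × Int) × (Int × Int × Int) :=
  let c := if q.1 == st.2.1 then (st.2.1, st.2.2.1, st.2.2.2 + 1) else (q.1, q.2, (1 : Int))
  let b := if c.2.2 > st.1.2.2 ∨ (c.2.2 = st.1.2.2 ∧ c.2.1 < st.1.2.1) then c else st.1
  (b, c)

def findMode_alt (mat : List (List Int)) : Int :=
  let flat := mat.flatten
  if flat = [] then 0   -- Python: 'if not flat: return None'; excluded by Pre_findMode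
  else
    -- sorted((v, i) for i, v in enumerate(flat)): tuples compare lexicographically
    match PySem.List.sorted2 ((PySem.List.enumerate flat).map (fun t => (t.2, t.1)))
        (fun p => p.1) (fun p => p.2) with
    | [] => 0          -- unreachable: flat ≠ [] so the sorted pair list is nonempty
    | p0 :: rest => (rest.foldl pvStep ((p0.1, p0.2, 1), (p0.1, p0.2, 1))).1.1

-- ===== PRECONDITION & SPEC =====
-- Pre_ excludes matrices with no elements at all: there A falls through all loops and returns None, not an int.
def Pre_findMode (mat : List (List Int)) : Prop := mat.flatten ≠ []
instance (mat : List (List Int)) : Decidable (Pre_findMode mat) := by unfold Pre_findMode; infer_instance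
def pvWitness_findMode : List (List Int) := [[1, 2, 2], [3]]
def Spec_findMode (mat : List (List Int)) (out : Int) : Prop := out = findMode_alt mat
instance (mat : List (List Int)) (out : Int) : Decidable (Spec_findMode mat out) := by unfold Spec_findMode; infer_instance

-- ===== CLAIM (what is proved, stated in full; the proofs are below) =====
def Claim_equal_findMode : Prop := ∀ (mat : List (List Int)), Dom_findMode mat → Pre_findMode mat → Spec_findMode mat (findMode mat)

-- ===== LEMMAS AND PROOFS =====

-- the shared characterisation: v is A's answer iff v occurs, has maximal count,
-- and among the count-maximal values has the smallest first-occurrence index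
def pvIsBest (xs : List Int) (v : Int) : Prop :=
  v ∈ xs ∧ ∀ w ∈ xs, xs.count w < xs.count v ∨ (xs.count w = xs.count v ∧ xs.idxOf v ≤ xs.idxOf w)

theorem pvIdxOf_le (xs : List Int) (v : Int) : ∀ (k : Nat), (h : k < xs.length) → xs[k] = v → xs.idxOf v ≤ k := by
  induction xs with
  | nil => intro k h; simp at h
  | cons x t ih =>
      intro k h hk
      by_cases hx : x = v
      · subst hx; simp [List.idxOf_cons_self]
      · cases k with
        | zero => simp at hk; exact absurd hk hx
        | succ k =>
            rw [List.idxOf_cons_ne _ (fun e => hx e)]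
            have := ih k (by simpa using h) (by simpa using hk)
            omega

theorem pvBestUnique (xs : List Int) (u v : Int) (hu : pvIsBest xs u) (hv : pvIsBest xs v) : u = v := by
  obtain ⟨hum, hud⟩ := hu
  obtain ⟨hvm, hvd⟩ := hv
  have h1 := hud v hvm
  have h2 := hvd u hum
  have hcnt : xs.count u = xs.count v := by omega
  have hidx : xs.idxOf u = xs.idxOf v := by omega
  have hul : xs.idxOf u < xs.length := List.idxOf_lt_length_iff.2 hum
  have h3 : xs[xs.idxOf u] = u := List.getElem_idxOf hul
  have h4 : xs[xs.idxOf v]'(List.idxOf_lt_length_iff.2 hvm) = v := List.getElem_idxOf _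
  rw [← h3, ← h4]
  congr 1

-- ---------- A side ----------

-- the body of port A after its dict is built (proof-only helper)
def pvA (d : PySem.Dict Int Int) : Int :=
  (d.keys.find? (fun i => d.getD i 0 ==
      d.keys.foldl (fun m i => if d.getD i 0 > m then d.getD i 0 else m) 0)).getD 0

-- first element attaining the running maximum of f (A's two final scans combined)
def pvGo (f : Int → Int) : Int → List Int → Int
  | a, [] => a
  | a, x :: t => if f a < f x then pvGo f x t else pvGo f a t

theorem pvGo_le (f : Int → Int) : ∀ (t : List Int) (a : Int), f a ≤ f (pvGo f a t) := by
  intro t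
  induction t with
  | nil => intro a; simp [pvGo]
  | cons x t ih =>
      intro a
      by_cases h : f a < f x
      · simpa [pvGo, h] using le_trans (le_of_lt h) (ih x)
      · simpa [pvGo, h] using ih a

theorem pvGo_le_mem (f : Int → Int) : ∀ (t : List Int) (a : Int), ∀ y ∈ a :: t, f y ≤ f (pvGo f a t) := by
  intro t
  induction t with
  | nil => intro a y hy; simp at hy; simp [pvGo, hy]
  | cons x t ih =>
      intro a y hy
      simp at hy
      by_cases h : f a < f x
      · simp only [pvGo, h, if_true]
        rcases hy with h1 | h1 | h1
        · rw [h1]; exact le_trans (le_of_lt h) (pvGo_le f t x)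
        · exact ih x y (by simp [h1])
        · exact ih x y (by simp [h1])
      · simp only [pvGo, h, if_false]
        rcases hy with h1 | h1 | h1
        · rw [h1]; exact pvGo_le f t a
        · rw [h1]; exact le_trans (le_of_not_gt h) (pvGo_le f t a)
        · exact ih a y (by simp [h1])

theorem pvGo_mem (f : Int → Int) : ∀ (t : List Int) (a : Int), pvGo f a t ∈ a :: t := by
  intro t
  induction t with
  | nil => intro a; simp [pvGo]
  | cons x t ih =>
      intro a
      by_cases h : f a < f x
      · have hm := ih x; simp [pvGo, h] at hm ⊢; tauto
      · have hm := ih a; simp [pvGo, h] at hm ⊢; tauto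

theorem pvGo_eq_self (f : Int → Int) : ∀ (t : List Int) (a : Int),
    f (pvGo f a t) ≤ f a → pvGo f a t = a := by
  intro t
  induction t with
  | nil => intro a _; simp [pvGo]
  | cons x t ih =>
      intro a hle
      by_cases h : f a < f x
      · exfalso
        have h1 : f x ≤ f (pvGo f x t) := pvGo_le f t x
        simp only [pvGo, h, if_true] at hle
        omega
      · simp only [pvGo, h, if_false] at hle ⊢
        exact ih a hle

-- A's second loop computes f (pvGo f a t) when started at f a
theorem pvMloop (f : Int → Int) : ∀ (t : List Int) (a : Int),
    t.foldl (fun m i => if f i > m then f i else m) (f a) = f (pvGo f a t) := by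
  intro t
  induction t with
  | nil => intro a; simp [pvGo]
  | cons x t ih =>
      intro a
      by_cases h : f a < f x
      · simpa [pvGo, h, gt_iff_lt] using ih x
      · simpa [pvGo, h, gt_iff_lt] using ih a

-- A's third loop (first key whose count equals the maximum) lands on pvGo
theorem pvFind (f : Int → Int) : ∀ (t : List Int) (a : Int),
    List.find? (fun i => f i == f (pvGo f a t)) (a :: t) = some (pvGo f a t) := by
  intro t
  induction t with
  | nil => intro a; simp [pvGo, List.find?]
  | cons x t ih =>
      intro a
      by_cases h : f a < f x
      · have hne : (f a == f (pvGo f x t)) = false := by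
          have := pvGo_le f t x; simp; omega
        simp only [pvGo, h, if_true, List.find?, hne]
        exact ih x
      · simp only [pvGo, h, if_false]
        by_cases hb : f a = f (pvGo f a t)
        · have ha : pvGo f a t = a := pvGo_eq_self f t a (le_of_eq hb.symm)
          simp [List.find?, ha]
        · have hlt : f a < f (pvGo f a t) := lt_of_le_of_ne (pvGo_le f t a) hb
          have hna : (f a == f (pvGo f a t)) = false := by simp; omega
          have hnx : (f x == f (pvGo f a t)) = false := by
            have hxa : f x ≤ f a := le_of_not_gt h
            simp; omega
          have ihx := ih a
          simp only [List.find?, hna] at ihx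
          simp only [List.find?, hna, hnx]
          exact ihx

-- A's dict-building double loop builds exactly Counter(mat.flatten)
theorem pvBuild (mat : List (List Int)) :
    mat.foldl (fun d i => i.foldl (fun d j =>
        if d.contains j = false then d.insert j 1 else d.modify j 0 (· + 1)) d)
      (PySem.Dict.empty : PySem.Dict Int Int)
      = PySem.Dict.counter mat.flatten := by
  have hstep : ∀ (d : PySem.Dict Int Int) (j : Int),
      (if d.contains j = false then d.insert j 1 else d.modify j 0 (· + 1)) = d.modify j 0 (· + 1) := by
    intro d j
    by_cases h : d.contains j = false
    · have h0 : d.get? j = none := (PySem.Dict.get?_eq_none_iff_contains d j).2 h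
      simp [h, PySem.Dict.modify, PySem.Dict.getD, h0]
    · simp [h]
  simp only [hstep]
  rw [← List.foldl_flatten, ← PySem.Dict.counter_eq_foldl]

-- the distinct keys of Counter(xs) are pairwise increasing in first-occurrence index
theorem pvPairwiseIdxOf (xs : List Int) :
    (PySem.Set.ofList xs).Pairwise (fun a b => xs.idxOf a < xs.idxOf b) := by
  induction xs with
  | nil => simp [PySem.Set.ofList]
  | cons x t ih =>
      rw [PySem.Set.ofList_cons]
      constructor
      · intro b hb
        have := (PySem.Set.mem_discard _ _ _).1 hb
        rw [List.idxOf_cons_self, List.idxOf_cons_ne _ (fun e => this.2 e.symm)]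
        omega
      · have hsub : ((PySem.Set.ofList t).discard x).Sublist (PySem.Set.ofList t) := by
          simp only [PySem.Set.discard]
          exact List.filter_sublist
        have hp := List.Pairwise.sublist hsub ih
        refine hp.imp_of_mem ?_
        intro a b ha hb hab
        have ha' := (PySem.Set.mem_discard _ _ _).1 ha
        have hb' := (PySem.Set.mem_discard _ _ _).1 hb
        rw [List.idxOf_cons_ne _ (fun e => ha'.2 e.symm), List.idxOf_cons_ne _ (fun e => hb'.2 e.symm)]
        omega

theorem pvBestA (xs : List Int) (h : xs ≠ []) : pvIsBest xs (pvA (PySem.Dict.counter xs)) := by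
  have hkeys : (PySem.Dict.counter xs).keys = PySem.Set.ofList xs := PySem.Dict.keys_counter xs
  set f : Int → Int := fun v => (PySem.Dict.counter xs).getD v 0 with hf
  have hfc : ∀ v, f v = (xs.count v : Int) := fun v => PySem.Dict.getD_counter xs v
  obtain ⟨x0, xs', hxs'⟩ : ∃ x0 xs', xs = x0 :: xs' := by
    cases xs with
    | nil => exact absurd rfl h
    | cons a b => exact ⟨a, b, rfl⟩
  obtain ⟨k, ks, hk⟩ : ∃ k ks, (PySem.Dict.counter xs).keys = k :: ks := by
    rw [hkeys]
    cases hofl : PySem.Set.ofList xs with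
    | nil =>
        exfalso
        have hx : x0 ∈ PySem.Set.ofList xs := (PySem.Set.mem_ofList xs x0).2 (by simp [hxs'])
        rw [hofl] at hx; simp at hx
    | cons a b => exact ⟨a, b, rfl⟩
  have hkmem : k ∈ xs := by
    have hx : k ∈ PySem.Set.ofList xs := by rw [← hkeys, hk]; simp
    exact (PySem.Set.mem_ofList xs k).1 hx
  have hkpos : 0 < f k := by
    rw [hfc k]
    exact_mod_cast List.count_pos_iff.2 hkmem
  have hA : pvA (PySem.Dict.counter xs) = pvGo f k ks := by
    unfold pvA
    rw [hk]
    have hM : List.foldl (fun m i => if f i > m then f i else m) 0 (k :: ks)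
        = f (pvGo f k ks) := by
      rw [List.foldl_cons]
      have h0 : (if f k > (0 : Int) then f k else 0) = f k := if_pos hkpos
      rw [h0]
      exact pvMloop f ks k
    rw [hM, pvFind f ks k]
    rfl
  rw [hA]
  set r := pvGo f k ks with hr
  have hrk : r ∈ k :: ks := pvGo_mem f ks k
  have hrmem : r ∈ xs := by
    have : r ∈ PySem.Set.ofList xs := by rw [← hkeys, hk]; exact hrk
    exact (PySem.Set.mem_ofList xs r).1 this
  refine ⟨hrmem, ?_⟩
  intro w hw
  have hwkeys : w ∈ k :: ks := by
    rw [← hk, hkeys]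
    exact (PySem.Set.mem_ofList xs w).2 hw
  have hle : f w ≤ f r := pvGo_le_mem f ks k w hwkeys
  have hlen : xs.count w ≤ xs.count r := by
    have := hle; rw [hfc, hfc] at this; exact_mod_cast this
  by_cases hceq : xs.count w = xs.count r
  · right
    refine ⟨hceq, ?_⟩
    have hfeq : f w = f r := by rw [hfc, hfc, hceq]
    obtain ⟨-, as, bs, hsplit, has⟩ := List.find?_eq_some_iff_append.1 (pvFind f ks k)
    have hwin : w ∈ r :: bs := by
      have : w ∈ as ++ r :: bs := by rw [← hsplit]; exact hwkeys
      rcases List.mem_append.1 this with hin | hin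
      · exfalso
        have := has w hin
        simp [hfeq] at this
        exact this (by rw [hr])
      · exact hin
    have hpw : (k :: ks).Pairwise (fun a b => xs.idxOf a < xs.idxOf b) := by
      rw [← hk, hkeys]
      exact pvPairwiseIdxOf xs
    rw [hsplit] at hpw
    have hpw2 := (List.pairwise_append.1 hpw).2.1
    rcases List.mem_cons.1 hwin with rfl | hin
    · exact le_refl _
    · exact le_of_lt ((List.pairwise_cons.1 hpw2).1 w hin)
  · left
    omega

-- ---------- B side ----------

-- the boolean comparison sorted2 uses for key pair (fst, snd) (lexicographic <)
def pvLt (p q : Int × Int) : Bool := decide (p.1 < q.1) || (!decide (q.1 < p.1) && decide (p.2 < q.2))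

-- the strict lexicographic order on (value, index) pairs
def pvLexLt (p q : Int × Int) : Prop := p.1 < q.1 ∨ (p.1 = q.1 ∧ p.2 < q.2)

-- the pair list B sorts
def pvPairs (xs : List Int) : List (Int × Int) := (PySem.List.enumerate xs).map (fun t => (t.2, t.1))

theorem pvInsertBy_pairwise {α : Type} (before : α → α → Bool)
    (hasym : ∀ a b, before a b = true → before b a = false)
    (htrans : ∀ a b c, before a b = true → before b c = true → before a c = true)
    (x : α) (ys : List α) (hys : ys.Pairwise (fun a b => before b a = false)) :
    (PySem.List.insertBy before x ys).Pairwise (fun a b => before b a = false) := by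
  induction ys with
  | nil => simp [PySem.List.insertBy]
  | cons y ys ih =>
      obtain ⟨hy, hys'⟩ := List.pairwise_cons.1 hys
      by_cases hxy : before x y = true
      · rw [show PySem.List.insertBy before x (y :: ys) = x :: y :: ys by
          simp [PySem.List.insertBy, hxy]]
        refine List.pairwise_cons.2 ⟨?_, hys⟩
        intro z hz
        rcases List.mem_cons.1 hz with rfl | hz'
        · exact hasym x z hxy
        · by_contra hne
          have hzx : before z x = true := by
            cases hb : before z x
            · exact absurd hb hne
            · rfl
          have := htrans z x y hzx hxy
          rw [hy z hz'] at this
          exact Bool.false_ne_true this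
      · have hxy' : before x y = false := by
          cases hb : before x y
          · rfl
          · exact absurd hb hxy
        rw [show PySem.List.insertBy before x (y :: ys) = y :: PySem.List.insertBy before x ys by
          simp [PySem.List.insertBy, hxy']]
        refine List.pairwise_cons.2 ⟨?_, ih hys'⟩
        intro z hz
        rcases (PySem.List.mem_insertBy before x z ys).1 hz with rfl | hz'
        · exact hxy'
        · exact hy z hz'

theorem pvFoldl_insertBy_pairwise {α : Type} (before : α → α → Bool)
    (hasym : ∀ a b, before a b = true → before b a = false)
    (htrans : ∀ a b c, before a b = true → before b c = true → before a c = true)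
    (xs : List α) : ∀ (acc : List α), acc.Pairwise (fun a b => before b a = false) →
    (xs.foldl (fun acc x => PySem.List.insertBy before x acc) acc).Pairwise (fun a b => before b a = false) := by
  induction xs with
  | nil => intro acc hacc; simpa using hacc
  | cons x xs ih =>
      intro acc hacc
      rw [List.foldl_cons]
      exact ih _ (pvInsertBy_pairwise before hasym htrans x acc hacc)

theorem pvSorted2_pairwise (l : List (Int × Int)) :
    (PySem.List.sorted2 l (fun p => p.1) (fun p => p.2)).Pairwise (fun a b => pvLt b a = false) := by
  have hasym : ∀ a b : Int × Int, pvLt a b = true → pvLt b a = false := by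
    intro a b hab
    simp [pvLt] at hab ⊢
    omega
  have htrans : ∀ a b c : Int × Int, pvLt a b = true → pvLt b c = true → pvLt a c = true := by
    intro a b c hab hbc
    simp [pvLt] at hab hbc ⊢
    omega
  have := pvFoldl_insertBy_pairwise pvLt hasym htrans l [] (by simp)
  simpa [PySem.List.sorted2, pvLt] using this

theorem pvPairs_nodup (xs : List Int) : (pvPairs xs).Nodup := by
  have h1 : (PySem.List.enumerate xs).Pairwise (fun p q => p.1 < q.1) :=
    PySem.List.pairwise_lt_enumerate xs 0
  unfold pvPairs List.Nodup
  rw [List.pairwise_map]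
  refine h1.imp ?_
  intro a b hab e
  have := congrArg Prod.snd e
  simp at this
  omega

theorem pvPairs_mem (xs : List Int) (p : Int × Int) :
    p ∈ pvPairs xs ↔ ∃ (k : Nat), ∃ (_ : k < xs.length), p = (xs[k], (k : Int)) := by
  unfold pvPairs
  rw [List.mem_map]
  constructor
  · rintro ⟨t, ht, rfl⟩
    obtain ⟨k, hk, rfl⟩ := (PySem.List.mem_enumerate_iff xs 0 t).1 ht
    exact ⟨k, hk, by simp⟩
  · rintro ⟨k, hk, rfl⟩
    refine ⟨((k : Int), xs[k]), ?_, by simp⟩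
    exact (PySem.List.mem_enumerate_iff xs 0 _).2 ⟨k, hk, by simp⟩

theorem pvPairs_countP (xs : List Int) (v : Int) :
    (pvPairs xs).countP (fun p => p.1 == v) = xs.count v := by
  unfold pvPairs
  suffices h : ∀ s : Int, ((PySem.List.enumerate xs s).map (fun t => (t.2, t.1))).countP (fun p => p.1 == v) = xs.count v from h 0
  induction xs with
  | nil => intro s; simp [PySem.List.enumerate_nil]
  | cons x t ih =>
      intro s
      rw [PySem.List.enumerate_cons]
      simp only [List.map_cons, List.countP_cons, List.count_cons, ih]

-- the sorted pair list is strictly lexicographically increasing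
theorem pvPs_pairwise (xs : List Int) :
    (PySem.List.sorted2 (pvPairs xs) (fun p => p.1) (fun p => p.2)).Pairwise pvLexLt := by
  have hperm := PySem.List.sorted2_perm (pvPairs xs) (fun p : Int × Int => p.1) (fun p : Int × Int => p.2) false
  have hnd : (PySem.List.sorted2 (pvPairs xs) (fun p => p.1) (fun p => p.2)).Nodup :=
    (hperm.nodup_iff).2 (pvPairs_nodup xs)
  have hle := pvSorted2_pairwise (pvPairs xs)
  refine (hle.and hnd).imp ?_
  rintro a b ⟨h1, h2⟩
  simp [pvLt] at h1
  unfold pvLexLt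
  rcases h1 with ⟨hba, himp⟩
  by_cases hab : a.1 < b.1
  · exact Or.inl hab
  · have hfst : a.1 = b.1 := le_antisymm hba (by omega)
    have hsnd : a.2 ≠ b.2 := by
      intro e
      exact h2 (Prod.ext hfst e)
    have := himp (le_of_eq hfst.symm)
    right
    exact ⟨hfst, by omega⟩

-- loop invariants: what (best, cur) mean after the processed prefix P
def pvCur (P : List (Int × Int)) (c : Int × Int × Int) : Prop :=
  (c.1, c.2.1) ∈ P ∧ (∀ p ∈ P, p.1 = c.1 → c.2.1 ≤ p.2) ∧
  c.2.2 = (P.countP (fun p => p.1 == c.1) : Int) ∧ (∀ p ∈ P, p.1 ≤ c.1)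

def pvBest (P : List (Int × Int)) (b : Int × Int × Int) : Prop :=
  (b.1, b.2.1) ∈ P ∧ (∀ p ∈ P, p.1 = b.1 → b.2.1 ≤ p.2) ∧
  b.2.2 = (P.countP (fun p => p.1 == b.1) : Int) ∧
  (∀ p ∈ P, (P.countP (fun q => q.1 == p.1) : Int) ≤ b.2.2 ∧
      ((P.countP (fun q => q.1 == p.1) : Int) = b.2.2 → b.2.1 ≤ p.2))

theorem pvCountP_append (P : List (Int × Int)) (q : Int × Int) (w : Int) :
    (P ++ [q]).countP (fun p => p.1 == w) = P.countP (fun p => p.1 == w) + (if q.1 = w then 1 else 0) := by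
  rw [List.countP_append]
  simp [List.countP_cons]

theorem pvStepCur_cont (P : List (Int × Int)) (q : Int × Int) (c : Int × Int × Int)
    (hq : ∀ p ∈ P, pvLexLt p q) (hc : pvCur P c) (heq : q.1 = c.1) :
    pvCur (P ++ [q]) (c.1, c.2.1, c.2.2 + 1) := by
  obtain ⟨hcmem, hcmin, hccnt, hcmax⟩ := hc
  have hqc := hq _ hcmem
  refine ⟨List.mem_append_left _ hcmem, ?_, ?_, ?_⟩
  · intro p hp hp1
    rcases List.mem_append.1 hp with hp' | hp'
    · exact hcmin p hp' hp1
    · have hpq : p = q := by simpa using hp'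
      subst hpq
      rcases hqc with hlt | ⟨-, hlt⟩
      · simp at hlt; omega
      · exact le_of_lt hlt
  · rw [pvCountP_append P q c.1, if_pos heq]
    push_cast
    omega
  · intro p hp
    rcases List.mem_append.1 hp with hp' | hp'
    · exact hcmax p hp'
    · have hpq : p = q := by simpa using hp'
      subst hpq
      exact le_of_eq heq

theorem pvStepCur_new (P : List (Int × Int)) (q : Int × Int) (c : Int × Int × Int)
    (hq : ∀ p ∈ P, pvLexLt p q) (hc : pvCur P c) (hne : q.1 ≠ c.1) :
    pvCur (P ++ [q]) (q.1, q.2, 1) := by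
  obtain ⟨hcmem, hcmin, hccnt, hcmax⟩ := hc
  have hqc := hq _ hcmem
  have hlt : c.1 < q.1 := by
    rcases hqc with hlt | ⟨he, -⟩
    · simpa using hlt
    · exact absurd (by simpa using he.symm) hne
  have hP0 : P.countP (fun p => p.1 == q.1) = 0 := by
    rw [List.countP_eq_zero]
    intro p hp
    have := hcmax p hp
    simp
    omega
  refine ⟨?_, ?_, ?_, ?_⟩
  · refine List.mem_append_right _ ?_
    simp
  · intro p hp hp1
    rcases List.mem_append.1 hp with hp' | hp'
    · exfalso
      have := hcmax p hp'
      omega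
    · have hpq : p = q := by simpa using hp'
      subst hpq
      exact le_refl _
  · rw [pvCountP_append P q q.1, if_pos rfl, hP0]
    simp
  · intro p hp
    rcases List.mem_append.1 hp with hp' | hp'
    · exact le_of_lt (lt_of_le_of_lt (hcmax p hp') hlt)
    · have hpq : p = q := by simpa using hp'
      subst hpq
      exact le_refl _

theorem pvStepBest (P : List (Int × Int)) (q : Int × Int) (b c' : Int × Int × Int)
    (hb : pvBest P b)
    (hcur : pvCur (P ++ [q]) c') (hc1 : c'.1 = q.1) :
    pvBest (P ++ [q]) (if c'.2.2 > b.2.2 ∨ (c'.2.2 = b.2.2 ∧ c'.2.1 < b.2.1) then c' else b) := by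
  obtain ⟨hbmem, hbmin, hbcnt, hbdom⟩ := hb
  obtain ⟨hcmem, hcmin, hccnt, hcmax⟩ := hcur
  have hCP := pvCountP_append P q
  -- p.1 ≠ q.1 → p ∈ P and counts are unchanged
  have hmemP : ∀ p ∈ P ++ [q], p.1 ≠ q.1 → p ∈ P := by
    intro p hp hne
    rcases List.mem_append.1 hp with hp' | hp'
    · exact hp'
    · exact absurd (by simpa using congrArg Prod.fst (by simpa using hp' : p = q)) hne
  by_cases hup : c'.2.2 > b.2.2 ∨ (c'.2.2 = b.2.2 ∧ c'.2.1 < b.2.1)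
  · rw [if_pos hup]
    refine ⟨hcmem, hcmin, hccnt, ?_⟩
    intro p hp
    by_cases hp1 : p.1 = q.1
    · constructor
      · rw [hp1, ← hc1, ← hccnt]
      · intro _
        exact hcmin p hp (hp1.trans hc1.symm)
    · have hpP := hmemP p hp hp1
      have hold := hbdom p hpP
      have hcnteq : (P ++ [q]).countP (fun r => r.1 == p.1) = P.countP (fun r => r.1 == p.1) := by
        rw [hCP p.1, if_neg (fun e => hp1 e.symm)]
        omega
      rw [hcnteq]
      rcases hup with hgt | ⟨heq2, hlt2⟩
      · exact ⟨by omega, by omega⟩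
      · refine ⟨by omega, ?_⟩
        intro he
        have := hold.2 (by omega)
        omega
  · rw [if_neg hup]
    push Not at hup
    -- the best key cannot be q's key: its count just grew, so an update would have fired
    have hbq : b.1 ≠ q.1 := by
      intro he
      have h1 : c'.2.2 = ((P ++ [q]).countP (fun p => p.1 == q.1) : Int) := by rw [hccnt, hc1]
      have h2 : b.2.2 = (P.countP (fun p => p.1 == b.1) : Int) := hbcnt
      rw [he] at h2
      have h3 := hCP q.1
      rw [if_pos rfl] at h3
      have : b.2.2 < c'.2.2 := by rw [h1, h2, h3]; push_cast; omega
      have := hup.1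
      omega
    refine ⟨List.mem_append_left _ hbmem, ?_, ?_, ?_⟩
    · intro p hp hp1
      by_cases hpq : p.1 = q.1
      · exact absurd (hp1.symm.trans hpq) hbq
      · exact hbmin p (hmemP p hp hpq) hp1
    · rw [hCP b.1, if_neg (fun e => hbq e.symm)]
      simpa using hbcnt
    · intro p hp
      by_cases hp1 : p.1 = q.1
      · have hcnt : ((P ++ [q]).countP (fun r => r.1 == p.1) : Int) = c'.2.2 := by
          rw [hccnt, hc1, hp1]
        rw [hcnt]
        refine ⟨hup.1, ?_⟩
        intro he
        have h4 := hup.2 he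
        have h5 : c'.2.1 ≤ p.2 := hcmin p hp (hp1.trans hc1.symm)
        omega
      · have hpP := hmemP p hp hp1
        have hold := hbdom p hpP
        have hcnteq : (P ++ [q]).countP (fun r => r.1 == p.1) = P.countP (fun r => r.1 == p.1) := by
          rw [hCP p.1, if_neg (fun e => hp1 e.symm)]
          omega
        rw [hcnteq]
        exact hold

theorem pvStep_inv (P : List (Int × Int)) (q : Int × Int) (b c : Int × Int × Int)
    (hq : ∀ p ∈ P, pvLexLt p q) (hb : pvBest P b) (hc : pvCur P c) :
    pvBest (P ++ [q]) (pvStep (b, c) q).1 ∧ pvCur (P ++ [q]) (pvStep (b, c) q).2 := by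
  by_cases hqeq : q.1 = c.1
  · have hcur' := pvStepCur_cont P q c hq hc hqeq
    have hstep : pvStep (b, c) q = (if (c.2.2 + 1 > b.2.2 ∨ (c.2.2 + 1 = b.2.2 ∧ c.2.1 < b.2.1)) then (c.1, c.2.1, c.2.2 + 1) else b, (c.1, c.2.1, c.2.2 + 1)) := by
      simp [pvStep, hqeq]
    rw [hstep]
    refine ⟨?_, hcur'⟩
    have := pvStepBest P q b (c.1, c.2.1, c.2.2 + 1) hb hcur' (by simpa using hqeq.symm)
    simpa using this
  · have hcur' := pvStepCur_new P q c hq hc hqeq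
    have hstep : pvStep (b, c) q = (if ((1:Int) > b.2.2 ∨ ((1:Int) = b.2.2 ∧ q.2 < b.2.1)) then (q.1, q.2, 1) else b, (q.1, q.2, (1:Int))) := by
      simp [pvStep, hqeq]
    rw [hstep]
    refine ⟨?_, hcur'⟩
    have := pvStepBest P q b (q.1, q.2, (1:Int)) hb hcur' rfl
    simpa using this

theorem pvLoop (Q : List (Int × Int)) : ∀ (P : List (Int × Int)) (b c : Int × Int × Int),
    (P ++ Q).Pairwise pvLexLt → pvBest P b → pvCur P c →
    pvBest (P ++ Q) (Q.foldl pvStep (b, c)).1 ∧ pvCur (P ++ Q) (Q.foldl pvStep (b, c)).2 := by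
  induction Q with
  | nil =>
      intro P b c _ hb hc
      simpa using ⟨hb, hc⟩
  | cons q Q ih =>
      intro P b c hp hb hc
      have hq : ∀ p ∈ P, pvLexLt p q := by
        have := (List.pairwise_append.1 hp).2.2
        intro p hpP
        exact this p hpP q (by simp)
      have hstep := pvStep_inv P q b c hq hb hc
      have hp' : ((P ++ [q]) ++ Q).Pairwise pvLexLt := by
        rw [List.append_assoc]
        simpa using hp
      have hmain := ih (P ++ [q]) (pvStep (b, c) q).1 (pvStep (b, c) q).2 hp' hstep.1 hstep.2
      rw [List.foldl_cons]
      rw [show P ++ q :: Q = (P ++ [q]) ++ Q by simp]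
      simpa using hmain

-- the body of port B after the guard (proof-only helper)
def pvB (xs : List Int) : Int :=
  match PySem.List.sorted2 ((PySem.List.enumerate xs).map (fun t => (t.2, t.1)))
      (fun p => p.1) (fun p => p.2) with
  | [] => 0
  | p0 :: rest => (rest.foldl pvStep ((p0.1, p0.2, 1), (p0.1, p0.2, 1))).1.1

theorem pvBestB (xs : List Int) (h : xs ≠ []) : pvIsBest xs (pvB xs) := by
  have hperm := PySem.List.sorted2_perm (pvPairs xs) (fun p : Int × Int => p.1) (fun p : Int × Int => p.2) false
  have hpair := pvPs_pairwise xs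
  have hmem : ∀ p, p ∈ PySem.List.sorted2 (pvPairs xs) (fun p => p.1) (fun p => p.2)
      ↔ ∃ (k : Nat), ∃ (_ : k < xs.length), p = (xs[k], (k : Int)) := by
    intro p
    exact hperm.mem_iff.trans (pvPairs_mem xs p)
  have hcnt : ∀ v, (PySem.List.sorted2 (pvPairs xs) (fun p => p.1) (fun p => p.2)).countP (fun p => p.1 == v) = xs.count v := by
    intro v
    exact (List.Perm.countP_eq _ hperm).trans (pvPairs_countP xs v)
  obtain ⟨x0, xs', hxs'⟩ : ∃ x0 xs', xs = x0 :: xs' := by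
    cases xs with
    | nil => exact absurd rfl h
    | cons a b => exact ⟨a, b, rfl⟩
  cases hps : PySem.List.sorted2 (pvPairs xs) (fun p : Int × Int => p.1) (fun p : Int × Int => p.2) false with
  | nil =>
      exfalso
      have h0 : xs.length > 0 := by rw [hxs']; simp
      have : ((xs[0]'h0, (0 : Int)) : Int × Int) ∈ PySem.List.sorted2 (pvPairs xs) (fun p => p.1) (fun p => p.2) :=
        (hmem _).2 ⟨0, h0, rfl⟩
      rw [hps] at this
      simp at this
  | cons p0 rest =>
      rw [hps] at hpair hmem hcnt
      have hb0 : pvBest [p0] (p0.1, p0.2, 1) := by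
        refine ⟨by simp, ?_, by simp, ?_⟩
        · intro p hp _
          have : p = p0 := by simpa using hp
          rw [this]
        · intro p hp
          have hpe : p = p0 := by simpa using hp
          subst hpe
          refine ⟨by simp, fun _ => le_refl _⟩
      have hc0 : pvCur [p0] (p0.1, p0.2, 1) := by
        refine ⟨by simp, ?_, by simp, ?_⟩
        · intro p hp _
          have : p = p0 := by simpa using hp
          rw [this]
        · intro p hp
          have : p = p0 := by simpa using hp
          rw [this]
      have hpair' : ([p0] ++ rest).Pairwise pvLexLt := by simpa using hpair
      have hloop := pvLoop rest [p0] (p0.1, p0.2, 1) (p0.1, p0.2, 1) hpair' hb0 hc0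
      obtain ⟨⟨hbmem, hbmin, hbcnt, hbdom⟩, -⟩ := hloop
      have hBval : pvB xs = (rest.foldl pvStep ((p0.1, p0.2, 1), (p0.1, p0.2, 1))).1.1 := by
        unfold pvB
        rw [show ((PySem.List.enumerate xs).map (fun t => (t.2, t.1))) = pvPairs xs from rfl, hps]
      rw [hBval]
      set bf := (rest.foldl pvStep ((p0.1, p0.2, 1), (p0.1, p0.2, 1))).1 with hbf
      simp only [List.singleton_append] at hbmem hbmin hbcnt hbdom
      -- the best triple's key and first index come from an actual matrix position
      obtain ⟨kb, hkb, hkbe⟩ := (hmem _).1 hbmem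
      have hb1 : bf.1 = xs[kb] := congrArg Prod.fst hkbe
      have hb2 : bf.2.1 = (kb : Int) := congrArg Prod.snd hkbe
      have hbidx : xs.idxOf bf.1 ≤ kb := pvIdxOf_le xs bf.1 kb hkb hb1.symm
      refine ⟨by rw [hb1]; exact List.getElem_mem hkb, ?_⟩
      intro w hw
      have hkw : xs.idxOf w < xs.length := List.idxOf_lt_length_iff.2 hw
      have hwp : ((w, (xs.idxOf w : Int)) : Int × Int) ∈ p0 :: rest :=
        (hmem _).2 ⟨xs.idxOf w, hkw, by rw [List.getElem_idxOf hkw]⟩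
      have hdom := hbdom _ hwp
      rw [hcnt w] at hdom
      have hbcnt' : bf.2.2 = (xs.count bf.1 : Int) := by rw [hbcnt, hcnt]
      rw [hbcnt'] at hdom
      by_cases hceq : xs.count w = xs.count bf.1
      · right
        refine ⟨hceq, ?_⟩
        have htie := hdom.2 (by exact_mod_cast congrArg (fun n : Nat => (n : Int)) hceq)
        have : bf.2.1 ≤ (xs.idxOf w : Int) := htie
        rw [hb2] at this
        have hkk : kb ≤ xs.idxOf w := by exact_mod_cast this
        omega
      · left
        have : (xs.count w : Int) ≤ (xs.count bf.1 : Int) := hdom.1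
        have h2 : xs.count w ≤ xs.count bf.1 := by exact_mod_cast this
        omega

-- ===== VERDICT (by name: the statement is the Claim_ definition above) =====
theorem findMode_spec : Claim_equal_findMode := by
  intro mat _ hpre
  unfold Spec_findMode
  have hA : findMode mat = pvA (PySem.Dict.counter mat.flatten) := by
    unfold findMode pvA
    rw [pvBuild]
  have hB : findMode_alt mat = pvB mat.flatten := by
    unfold findMode_alt pvB
    rw [if_neg hpre]
  rw [hA, hB]
  exact pvBestUnique mat.flatten _ _ (pvBestA mat.flatten hpre) (pvBestB mat.flatten hpre)
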